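-- pv_equiv track=rewrite | github.com/water-vapor/synth-rearc | synth_rearc/tasks/task_34cfa167/helpers.py | vertical_cycle_34cfa167
-- ===== SOURCE A (Python) =====
-- def vertical_cycle_34cfa167(
--     length: int,
--     lead: int,
--     tail: int,
--     bg: int,
-- ) -> tuple[int, ...]:
--     period = (lead, bg, tail, bg)
--     return tuple(period[idx % 4] for idx in range(length))
-- ===== SOURCE B (Python) =====
-- def vertical_cycle_34cfa167(
--     length: int,
--     lead: int,
--     tail: int,
--     bg: int,
-- ) -> tuple[int, ...]:
--     period = (lead, bg, tail, bg)
--     reps = (length + 3) // 4 if length > 0 else 0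
--     return (period * reps)[:length]
-- ===== Notes on version B (the rewrite author's own statement) =====
-- stated objective: simpler
-- what changed: B builds the result by repeating the 4-tuple period ceil(length/4) times and slicing to length, instead of A's per-index generator with a modulo lookup.
import Mathlib
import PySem

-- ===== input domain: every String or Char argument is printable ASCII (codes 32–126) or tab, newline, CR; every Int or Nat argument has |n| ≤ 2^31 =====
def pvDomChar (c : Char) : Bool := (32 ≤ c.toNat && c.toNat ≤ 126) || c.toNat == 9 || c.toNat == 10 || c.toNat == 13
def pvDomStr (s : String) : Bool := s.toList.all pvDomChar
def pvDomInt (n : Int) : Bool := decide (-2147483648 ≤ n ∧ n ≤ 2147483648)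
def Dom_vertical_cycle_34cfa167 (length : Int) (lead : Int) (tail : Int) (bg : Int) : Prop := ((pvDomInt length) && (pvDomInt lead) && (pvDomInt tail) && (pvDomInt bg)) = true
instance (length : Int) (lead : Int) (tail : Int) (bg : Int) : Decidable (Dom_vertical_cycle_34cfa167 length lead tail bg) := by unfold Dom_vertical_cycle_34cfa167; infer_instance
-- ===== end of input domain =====

-- B replaces A's per-index modulo generator by tuple repetition plus a slice (objective: simpler).

-- ===== PORT A =====
def vertical_cycle_34cfa167 (length : Int) (lead : Int) (tail : Int) (bg : Int) : List Int :=
  let period : List Int := [lead, bg, tail, bg]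
  (PySem.List.pyRange 0 length 1).map (fun idx => PySem.List.pyGetD period (PySem.Int.mod idx 4) 0)

-- ===== PORT B =====
def vertical_cycle_34cfa167_alt (length : Int) (lead : Int) (tail : Int) (bg : Int) : List Int :=
  let period : List Int := [lead, bg, tail, bg]
  let reps : Int := if length > 0 then PySem.Int.floordiv (length + 3) 4 else 0
  PySem.List.slice (List.flatten (List.replicate reps.toNat period)) none (some length)

-- ===== PRECONDITION & SPEC =====
def Spec_vertical_cycle_34cfa167 (length : Int) (lead : Int) (tail : Int) (bg : Int) (out : List Int) : Prop := out = vertical_cycle_34cfa167_alt length lead tail bg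
instance (length : Int) (lead : Int) (tail : Int) (bg : Int) (out : List Int) : Decidable (Spec_vertical_cycle_34cfa167 length lead tail bg out) := by unfold Spec_vertical_cycle_34cfa167; infer_instance

-- ===== CLAIM (what is proved, stated in full; the proofs are below) =====
def Claim_equal_vertical_cycle_34cfa167 : Prop := ∀ (length : Int) (lead : Int) (tail : Int) (bg : Int), Dom_vertical_cycle_34cfa167 length lead tail bg → Spec_vertical_cycle_34cfa167 length lead tail bg (vertical_cycle_34cfa167 length lead tail bg)

-- ===== LEMMAS AND PROOFS =====

lemma pv_flat_rep_getElem? (P : List Int) (hP : P.length = 4) :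
    ∀ (k i : Nat), i < 4 * k → (List.flatten (List.replicate k P))[i]? = P[i % 4]? := by
  intro k
  induction k with
  | zero => intro i hi; omega
  | succ k ih =>
      intro i hi
      rw [List.replicate_succ, List.flatten_cons, List.getElem?_append]
      by_cases h4 : i < 4
      · rw [if_pos (by omega), Nat.mod_eq_of_lt h4]
      · rw [if_neg (by omega), hP, ih (i - 4) (by omega),
          Nat.mod_eq_sub_mod (by omega : 4 ≤ i)]

lemma pv_main (P : List Int) (hP : P.length = 4) (n : Nat) :
    (List.range n).map (fun k => PySem.List.pyGetD P (PySem.Int.mod ((k : Nat) : Int) 4) 0) =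
      (List.flatten (List.replicate ((n + 3) / 4) P)).take n := by
  apply List.ext_getElem?
  intro i
  by_cases hi : i < n
  · rw [List.getElem?_take, if_pos hi, List.getElem?_map, List.getElem?_range hi,
      pv_flat_rep_getElem? P hP _ i (by omega)]
    have hm : PySem.Int.mod ((i : Nat) : Int) 4 = ((i % 4 : Nat) : Int) := by
      exact_mod_cast PySem.Int.mod_natCast i 4
    rw [Option.map_some, hm, PySem.List.pyGetD_natCast, List.getD_eq_getElem?_getD,
      List.getElem?_eq_getElem (by omega)]
    rfl
  · rw [List.getElem?_take, if_neg hi]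
    exact List.getElem?_eq_none (by simp; omega)

lemma pv_branch (lead tail bg : Int) (n : Nat) :
    (PySem.List.pyRange 0 ((n : Nat) : Int) 1).map
        (fun idx => PySem.List.pyGetD [lead, bg, tail, bg] (PySem.Int.mod idx 4) 0) =
      PySem.List.slice
        (List.flatten (List.replicate (PySem.Int.floordiv (((n : Nat) : Int) + 3) 4).toNat
          [lead, bg, tail, bg])) none (some ((n : Nat) : Int)) := by
  have h4 : PySem.Int.floordiv (((n : Nat) : Int) + 3) 4 = (((n + 3) / 4 : Nat) : Int) := by
    exact_mod_cast PySem.Int.floordiv_natCast (n + 3) 4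
  rw [h4, Int.toNat_natCast, PySem.List.slice_to_natCast, PySem.List.pyRange_zero_natCast,
    List.map_map]
  exact pv_main [lead, bg, tail, bg] rfl n

-- ===== VERDICT (by name: the statement is the Claim_ definition above) =====
theorem vertical_cycle_34cfa167_spec : Claim_equal_vertical_cycle_34cfa167 := by
  intro length lead tail bg _
  unfold Spec_vertical_cycle_34cfa167 vertical_cycle_34cfa167 vertical_cycle_34cfa167_alt
  by_cases hpos : length > 0
  · rw [if_pos hpos]
    obtain ⟨n, hn⟩ : ∃ n : Nat, length = (n : Int) :=
      ⟨length.toNat, (Int.toNat_of_nonneg (by omega)).symm⟩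
    subst hn
    exact pv_branch lead tail bg n
  · rw [if_neg hpos, PySem.List.pyRange_one_eq_nil (by omega)]
    simp [PySem.List.slice]
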